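-- pv_equiv track=rewrite | github.com/shruti985/Hackathon_project-Thapar- | frontend/pregnancy_diet/analyser.py | close_gaps
-- ===== SOURCE A (Python) =====
-- FOOD_DB = {
--     "Protein": [
--         ("Eggs", "2 eggs", {"Protein": 12}),
--         ("Paneer / Tofu", "100 g", {"Protein": 16}),
--         ("Chicken (cooked)", "100 g", {"Protein": 27}),
--         ("Lentils (dal, cooked)", "1 cup", {"Protein": 18}),
--         ("Greek Yogurt", "200 g", {"Protein": 20})
--     ],
--     "Iron": [
--         ("Spinach (cooked)", "1 cup", {"Iron": 6}),
--         ("Chana/Rajma (cooked)", "1 cup", {"Iron": 4}),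
--         ("Red Meat (cooked)", "100 g", {"Iron": 3}),
--         ("Fortified Cereal", "1 serving", {"Iron": 8})
--     ],
--     "Calories": [
--         ("Whole grains (roti/rice/oats)", "2 servings", {"Calories": 250}),
--         ("Nuts", "30 g", {"Calories": 180}),
--         ("Banana + milk", "1 banana + 1 cup", {"Calories": 250}),
--     ]
-- }
--
-- def close_gaps(nutrient, gap_value):
--     if nutrient not in FOOD_DB: return []
--     plan, remaining = [], gap_value
--     for food, unit, contrib in FOOD_DB[nutrient]:
--         if remaining <= 0: break
--         plan.append((food, unit))
--         remaining -= list(contrib.values())[0]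
--     return plan
-- ===== SOURCE B (Python) =====
-- # Precomputed plan table: FOOD_DB flattened to (food, unit, cumulative contribution
-- # of all earlier foods).  A food is in the plan iff that prefix total is still
-- # below the gap, so close_gaps is a single filter over the table.
-- PLAN_TABLE = {
--     "Protein": [
--         ("Eggs", "2 eggs", 0),
--         ("Paneer / Tofu", "100 g", 12),
--         ("Chicken (cooked)", "100 g", 28),
--         ("Lentils (dal, cooked)", "1 cup", 55),
--         ("Greek Yogurt", "200 g", 73),
--     ],
--     "Iron": [
--         ("Spinach (cooked)", "1 cup", 0),
--         ("Chana/Rajma (cooked)", "1 cup", 6),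
--         ("Red Meat (cooked)", "100 g", 10),
--         ("Fortified Cereal", "1 serving", 13),
--     ],
--     "Calories": [
--         ("Whole grains (roti/rice/oats)", "2 servings", 0),
--         ("Nuts", "30 g", 250),
--         ("Banana + milk", "1 banana + 1 cup", 430),
--     ],
-- }
--
-- def close_gaps(nutrient, gap_value):
--     return [(food, unit) for food, unit, before in PLAN_TABLE.get(nutrient, [])
--             if before < gap_value]
-- ===== Notes on version B (the rewrite author's own statement) =====
-- stated objective: alternative
-- what changed: Replaces A's running-remainder loop with break by a precomputed lookup table holding each food's cumulative prefix contribution, so the plan is one filter (keep a food iff the prefix total before it is still below the gap) with no mutable state.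
import Mathlib
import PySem

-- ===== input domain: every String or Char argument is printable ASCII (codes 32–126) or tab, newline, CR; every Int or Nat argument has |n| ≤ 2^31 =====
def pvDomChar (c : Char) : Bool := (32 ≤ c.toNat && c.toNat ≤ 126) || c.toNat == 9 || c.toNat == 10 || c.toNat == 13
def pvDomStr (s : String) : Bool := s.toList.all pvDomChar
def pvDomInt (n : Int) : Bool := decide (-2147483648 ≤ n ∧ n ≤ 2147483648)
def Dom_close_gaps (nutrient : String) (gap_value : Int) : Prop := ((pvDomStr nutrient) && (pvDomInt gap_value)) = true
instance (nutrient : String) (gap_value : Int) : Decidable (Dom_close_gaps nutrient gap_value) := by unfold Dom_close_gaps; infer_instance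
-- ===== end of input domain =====

-- B replaces A's running-remainder loop-with-break by a precomputed prefix-sum lookup table and a single filter (alternative decomposition, same cost).

-- ===== PORT A =====
-- the FOOD_DB module constant of A's module
def pvFoodsProtein : List (String × String × PySem.Dict String Int) :=
  [("Eggs", "2 eggs", PySem.Dict.ofList [("Protein", (12:Int))]),
   ("Paneer / Tofu", "100 g", PySem.Dict.ofList [("Protein", (16:Int))]),
   ("Chicken (cooked)", "100 g", PySem.Dict.ofList [("Protein", (27:Int))]),
   ("Lentils (dal, cooked)", "1 cup", PySem.Dict.ofList [("Protein", (18:Int))]),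
   ("Greek Yogurt", "200 g", PySem.Dict.ofList [("Protein", (20:Int))])]
def pvFoodsIron : List (String × String × PySem.Dict String Int) :=
  [("Spinach (cooked)", "1 cup", PySem.Dict.ofList [("Iron", (6:Int))]),
   ("Chana/Rajma (cooked)", "1 cup", PySem.Dict.ofList [("Iron", (4:Int))]),
   ("Red Meat (cooked)", "100 g", PySem.Dict.ofList [("Iron", (3:Int))]),
   ("Fortified Cereal", "1 serving", PySem.Dict.ofList [("Iron", (8:Int))])]
def pvFoodsCalories : List (String × String × PySem.Dict String Int) :=
  [("Whole grains (roti/rice/oats)", "2 servings", PySem.Dict.ofList [("Calories", (250:Int))]),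
   ("Nuts", "30 g", PySem.Dict.ofList [("Calories", (180:Int))]),
   ("Banana + milk", "1 banana + 1 cup", PySem.Dict.ofList [("Calories", (250:Int))])]
def pvFoodDB : PySem.Dict String (List (String × String × PySem.Dict String Int)) :=
  PySem.Dict.ofList
    [("Protein", pvFoodsProtein), ("Iron", pvFoodsIron), ("Calories", pvFoodsCalories)]

-- A's for-loop with break: plan/remaining accumulator
def close_gaps_loop : List (String × String × PySem.Dict String Int) →
    List (String × String) → Int → List (String × String)
  | [], plan, _ => plan
  | (food, unit, contrib) :: rest, plan, remaining =>
      if remaining ≤ 0 then plan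
      else close_gaps_loop rest (plan ++ [(food, unit)])
        (remaining - PySem.List.pyGetD (PySem.Dict.values contrib) 0 0)

def close_gaps (nutrient : String) (gap_value : Int) : List (String × String) :=
  match PySem.Dict.get? pvFoodDB nutrient with
  | none => []
  | some foods => close_gaps_loop foods [] gap_value

-- ===== PORT B =====
-- B's PLAN_TABLE module constant: (food, unit, cumulative contribution before it)
def pvPlanTable : PySem.Dict String (List (String × String × Int)) :=
  PySem.Dict.ofList
    [("Protein",
      [("Eggs", "2 eggs", (0:Int)),
       ("Paneer / Tofu", "100 g", 12),
       ("Chicken (cooked)", "100 g", 28),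
       ("Lentils (dal, cooked)", "1 cup", 55),
       ("Greek Yogurt", "200 g", 73)]),
     ("Iron",
      [("Spinach (cooked)", "1 cup", (0:Int)),
       ("Chana/Rajma (cooked)", "1 cup", 6),
       ("Red Meat (cooked)", "100 g", 10),
       ("Fortified Cereal", "1 serving", 13)]),
     ("Calories",
      [("Whole grains (roti/rice/oats)", "2 servings", (0:Int)),
       ("Nuts", "30 g", 250),
       ("Banana + milk", "1 banana + 1 cup", 430)])]

def close_gaps_alt (nutrient : String) (gap_value : Int) : List (String × String) :=
  ((PySem.Dict.getD pvPlanTable nutrient []).filter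
      (fun t => decide (t.2.2 < gap_value))).map (fun t => (t.1, t.2.1))

-- ===== PRECONDITION & SPEC =====
def Spec_close_gaps (nutrient : String) (gap_value : Int) (out : List (String × String)) : Prop := out = close_gaps_alt nutrient gap_value
instance (nutrient : String) (gap_value : Int) (out : List (String × String)) : Decidable (Spec_close_gaps nutrient gap_value out) := by unfold Spec_close_gaps; infer_instance

-- ===== CLAIM (what is proved, stated in full; the proofs are below) =====
def Claim_equal_close_gaps : Prop := ∀ (nutrient : String) (gap_value : Int), Dom_close_gaps nutrient gap_value → Spec_close_gaps nutrient gap_value (close_gaps nutrient gap_value)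

-- ===== LEMMAS AND PROOFS =====

-- single-value dict: list(d.values())[0]
theorem pv_getD_single (k : String) (v : Int) :
    PySem.List.pyGetD (PySem.Dict.values (PySem.Dict.ofList [(k, v)])) 0 0 = v := rfl

theorem pv_eq_protein (g : Int) :
    close_gaps "Protein" g = close_gaps_alt "Protein" g := by
  show close_gaps_loop pvFoodsProtein [] g = close_gaps_alt "Protein" g
  rw [show close_gaps_alt "Protein" g =
      (([("Eggs", "2 eggs", (0:Int)), ("Paneer / Tofu", "100 g", 12),
         ("Chicken (cooked)", "100 g", 28), ("Lentils (dal, cooked)", "1 cup", 55),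
         ("Greek Yogurt", "200 g", 73)].filter
            (fun t => decide (t.2.2 < g))).map (fun t => (t.1, t.2.1))) from rfl]
  simp only [pvFoodsProtein, close_gaps_loop, List.filter_cons, List.filter_nil,
    decide_eq_true_eq, pv_getD_single]
  split_ifs <;> first | rfl | omega

theorem pv_eq_iron (g : Int) :
    close_gaps "Iron" g = close_gaps_alt "Iron" g := by
  show close_gaps_loop pvFoodsIron [] g = close_gaps_alt "Iron" g
  rw [show close_gaps_alt "Iron" g =
      (([("Spinach (cooked)", "1 cup", (0:Int)), ("Chana/Rajma (cooked)", "1 cup", 6),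
         ("Red Meat (cooked)", "100 g", 10), ("Fortified Cereal", "1 serving", 13)].filter
            (fun t => decide (t.2.2 < g))).map (fun t => (t.1, t.2.1))) from rfl]
  simp only [pvFoodsIron, close_gaps_loop, List.filter_cons, List.filter_nil,
    decide_eq_true_eq, pv_getD_single]
  split_ifs <;> first | rfl | omega

theorem pv_eq_calories (g : Int) :
    close_gaps "Calories" g = close_gaps_alt "Calories" g := by
  show close_gaps_loop pvFoodsCalories [] g = close_gaps_alt "Calories" g
  rw [show close_gaps_alt "Calories" g =
      (([("Whole grains (roti/rice/oats)", "2 servings", (0:Int)), ("Nuts", "30 g", 250),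
         ("Banana + milk", "1 banana + 1 cup", 430)].filter
            (fun t => decide (t.2.2 < g))).map (fun t => (t.1, t.2.1))) from rfl]
  simp only [pvFoodsCalories, close_gaps_loop, List.filter_cons, List.filter_nil,
    decide_eq_true_eq, pv_getD_single]
  split_ifs <;> first | rfl | omega

theorem pv_get_none (n : String) (h1 : n ≠ "Protein") (h2 : n ≠ "Iron") (h3 : n ≠ "Calories") :
    PySem.Dict.get? pvFoodDB n = none := by
  simp only [pvFoodDB, PySem.Dict.get?, PySem.Dict.ofList]
  rw [Option.map_eq_none_iff, List.find?_eq_none]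
  rintro ⟨a, b⟩ hab
  rw [show (PySem.Dict.empty.update
      [("Protein", pvFoodsProtein), ("Iron", pvFoodsIron), ("Calories", pvFoodsCalories)]).items
      = [("Protein", pvFoodsProtein), ("Iron", pvFoodsIron), ("Calories", pvFoodsCalories)] from rfl] at hab
  simp only [List.mem_cons, List.not_mem_nil, or_false, Prod.mk.injEq] at hab
  rcases hab with ⟨rfl, -⟩ | ⟨rfl, -⟩ | ⟨rfl, -⟩ <;>
    simp [h1.symm, h2.symm, h3.symm]

theorem pv_plan_none (n : String) (h1 : n ≠ "Protein") (h2 : n ≠ "Iron") (h3 : n ≠ "Calories") :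
    PySem.Dict.get? pvPlanTable n = none := by
  simp only [pvPlanTable, PySem.Dict.get?, PySem.Dict.ofList]
  rw [Option.map_eq_none_iff, List.find?_eq_none]
  rintro ⟨a, b⟩ hab
  have hk : (a, b) ∈ [("Protein", [("Eggs", "2 eggs", (0:Int)), ("Paneer / Tofu", "100 g", 12),
        ("Chicken (cooked)", "100 g", 28), ("Lentils (dal, cooked)", "1 cup", 55),
        ("Greek Yogurt", "200 g", 73)]),
      ("Iron", [("Spinach (cooked)", "1 cup", (0:Int)), ("Chana/Rajma (cooked)", "1 cup", 6),
        ("Red Meat (cooked)", "100 g", 10), ("Fortified Cereal", "1 serving", 13)]),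
      ("Calories", [("Whole grains (roti/rice/oats)", "2 servings", (0:Int)), ("Nuts", "30 g", 250),
        ("Banana + milk", "1 banana + 1 cup", 430)])] := hab
  simp only [List.mem_cons, List.not_mem_nil, or_false, Prod.mk.injEq] at hk
  rcases hk with ⟨rfl, -⟩ | ⟨rfl, -⟩ | ⟨rfl, -⟩ <;>
    simp [h1.symm, h2.symm, h3.symm]

-- ===== VERDICT (by name: the statement is the Claim_ definition above) =====
theorem close_gaps_spec : Claim_equal_close_gaps := by
  intro n g _
  unfold Spec_close_gaps
  by_cases h1 : n = "Protein"
  · subst h1; exact pv_eq_protein g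
  by_cases h2 : n = "Iron"
  · subst h2; exact pv_eq_iron g
  by_cases h3 : n = "Calories"
  · subst h3; exact pv_eq_calories g
  simp [close_gaps, close_gaps_alt, PySem.Dict.getD,
    pv_get_none n h1 h2 h3, pv_plan_none n h1 h2 h3]
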